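-- pv_equiv track=rewrite | github.com/steveomk-crypto/LokiAI | scripts/replay_paper_trader_v2_filters.py | pair_trades
-- ===== SOURCE A (Python) =====
-- def pair_trades(opens, trades):
--     used = [False] * len(trades)
--     pairs = []
--     for op in opens:
--         match = None
--         for i, trade in enumerate(trades):
--             if used[i]:
--                 continue
--             if trade.get('token') == op.get('token') and trade.get('tier') == op.get('tier'):
--                 match = (i, trade)
--                 break
--         if match is None:
--             continue
--         i, trade = match
--         used[i] = True
--         pairs.append((op, trade))
--     return pairs
-- ===== SOURCE B (Python) =====
-- def pair_trades(opens, trades):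
--     # Two-phase equi-join on (key, occurrence ordinal): the n-th open with a given
--     # (token, tier) key pairs with the n-th trade of that key, which is exactly what
--     # A's greedy first-unused scan produces.
--     slot = {}
--     cnt = {}
--     for trade in trades:
--         k = (trade.get('token'), trade.get('tier'))
--         j = cnt.get(k, 0)
--         cnt[k] = j + 1
--         slot[(k, j)] = trade
--     pairs = []
--     seen = {}
--     for op in opens:
--         k = (op.get('token'), op.get('tier'))
--         j = seen.get(k, 0)
--         seen[k] = j + 1
--         if (k, j) in slot:
--             pairs.append((op, slot[(k, j)]))
--     return pairs
-- ===== Notes on version B (the rewrite author's own statement) =====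
-- stated objective: alternative
-- what changed: Replaced A's greedy scan of all trades with used-flags per open by a two-phase equi-join: one pass numbers each trade by its occurrence ordinal within its (token,tier) key into a dict keyed by (key, ordinal), a second pass numbers each open the same way and joins on (key, ordinal); correct because A's first-unused matching pairs the n-th open of a key with the n-th trade of that key. O(opens+trades) vs O(opens*trades), but no speed claim is made unless a timing run confirms it.
import Mathlib
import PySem

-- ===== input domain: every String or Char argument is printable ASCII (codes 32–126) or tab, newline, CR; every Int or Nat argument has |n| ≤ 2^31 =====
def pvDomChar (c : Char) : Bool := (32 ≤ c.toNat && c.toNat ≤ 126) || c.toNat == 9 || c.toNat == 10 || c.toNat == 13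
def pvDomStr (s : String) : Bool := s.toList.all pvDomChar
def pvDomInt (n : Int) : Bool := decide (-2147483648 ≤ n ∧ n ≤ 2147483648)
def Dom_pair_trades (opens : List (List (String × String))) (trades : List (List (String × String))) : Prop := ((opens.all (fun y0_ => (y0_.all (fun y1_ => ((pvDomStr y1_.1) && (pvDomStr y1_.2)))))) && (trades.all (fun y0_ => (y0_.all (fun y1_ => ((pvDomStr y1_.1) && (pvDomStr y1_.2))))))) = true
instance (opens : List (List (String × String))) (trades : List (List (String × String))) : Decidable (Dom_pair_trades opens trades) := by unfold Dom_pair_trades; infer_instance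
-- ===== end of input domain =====

-- B replaces A's greedy scan-with-used-flags by a two-phase equi-join on (key, occurrence
-- ordinal): number trades and opens within each (token,tier) key and join on (key, n);
-- objective: alternative algorithm (same return value, different strategy).

-- used[i] on the boolean used-flags list (index always in range in A)
def usedAt (used : List Bool) (i : Nat) : Bool := used.getD i false

-- d.get('key') on a Python dict, received here as an association list (first match)
def dget (d : List (String × String)) (key : String) : Option String :=
  (PySem.Dict.mk d).get? key

-- the (token, tier) key of a record, used by both ports
def tkey (d : List (String × String)) : Option String × Option String :=
  (dget d "token", dget d "tier")

-- ===== PORT A =====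
-- inner loop: `for i, trade in enumerate(trades): if used[i]: continue; if … : match = (i, trade); break`
def findMatch (used : List Bool) (op : List (String × String)) (i : Nat) :
    List (List (String × String)) → Option (Nat × List (String × String))
  | [] => none
  | t :: rest =>
    if usedAt used i then findMatch used op (i + 1) rest
    else if dget t "token" = dget op "token" ∧ dget t "tier" = dget op "tier" then some (i, t)
    else findMatch used op (i + 1) rest

-- outer loop over opens, carrying `used` and `pairs`
def aLoop (trades : List (List (String × String))) :
    List (List (String × String)) → List Bool →
    List ((List (String × String)) × (List (String × String))) →
    List ((List (String × String)) × (List (String × String)))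
  | [], _, pairs => pairs
  | op :: ops, used, pairs =>
    match findMatch used op 0 trades with
    | none => aLoop trades ops used pairs
    | some (i, t) => aLoop trades ops (used.set i true) (pairs ++ [(op, t)])

def pair_trades (opens : List (List (String × String))) (trades : List (List (String × String))) :
    List ((List (String × String)) × (List (String × String))) :=
  aLoop trades opens (List.replicate trades.length false) []

-- ===== PORT B =====
-- first pass: `j = cnt.get(k, 0); cnt[k] = j + 1; slot[(k, j)] = trade`
-- (the ordinal j is a nonnegative Python int, carried as Nat)
def buildSlots (trades : List (List (String × String))) :
    PySem.Dict ((Option String × Option String) × Nat) (List (String × String)) ×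
    PySem.Dict (Option String × Option String) Nat :=
  trades.foldl
    (fun p t =>
      let k := tkey t
      let j := p.2.getD k 0
      (p.1.insert (k, j) t, p.2.insert k (j + 1)))
    (PySem.Dict.empty, PySem.Dict.empty)

-- second pass: `j = seen.get(k, 0); seen[k] = j + 1; if (k, j) in slot: pairs.append(...)`
def bLoop (slot : PySem.Dict ((Option String × Option String) × Nat) (List (String × String))) :
    List (List (String × String)) →
    PySem.Dict (Option String × Option String) Nat →
    List ((List (String × String)) × (List (String × String))) →
    List ((List (String × String)) × (List (String × String)))
  | [], _, pairs => pairs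
  | op :: ops, seen, pairs =>
    let k := tkey op
    let j := seen.getD k 0
    match slot.get? (k, j) with
    | some t => bLoop slot ops (seen.insert k (j + 1)) (pairs ++ [(op, t)])
    | none => bLoop slot ops (seen.insert k (j + 1)) pairs

def pair_trades_alt (opens : List (List (String × String))) (trades : List (List (String × String))) :
    List ((List (String × String)) × (List (String × String))) :=
  bLoop (buildSlots trades).1 opens PySem.Dict.empty []

-- ===== PRECONDITION & SPEC =====
def Spec_pair_trades (opens : List (List (String × String))) (trades : List (List (String × String))) (out : List ((List (String × String)) × (List (String × String)))) : Prop := out = pair_trades_alt opens trades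
instance (opens : List (List (String × String))) (trades : List (List (String × String))) (out : List ((List (String × String)) × (List (String × String)))) : Decidable (Spec_pair_trades opens trades out) := by unfold Spec_pair_trades; infer_instance

-- ===== CLAIM (what is proved, stated in full; the proofs are below) =====
def Claim_equal_pair_trades : Prop := ∀ (opens : List (List (String × String))) (trades : List (List (String × String))), Dom_pair_trades opens trades → Spec_pair_trades opens trades (pair_trades opens trades)

-- ===== LEMMAS AND PROOFS =====

-- abstract reference loop over a queue-valued function F : key → remaining trades (front first)
def refLoop :
    List (List (String × String)) →
    ((Option String × Option String) → List (List (String × String))) →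
    List ((List (String × String)) × (List (String × String))) →
    List ((List (String × String)) × (List (String × String)))
  | [], _, pairs => pairs
  | op :: ops, F, pairs =>
    match F (tkey op) with
    | [] => refLoop ops F pairs
    | t :: _ =>
      refLoop ops (fun k' => if k' = tkey op then (F (tkey op)).tail else F k') (pairs ++ [(op, t)])

-- the enumerated unused trades with key k, starting at index i
def remI (used : List Bool) (k : Option String × Option String) :
    Nat → List (List (String × String)) → List (Nat × List (String × String))
  | _, [] => []
  | i, t :: rest =>
    if usedAt used i = false ∧ tkey t = k then (i, t) :: remI used k (i + 1) rest
    else remI used k (i + 1) rest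

lemma usedAt_set_ne (l : List Bool) (j m : Nat) (h : m ≠ j) :
    usedAt (l.set j true) m = usedAt l m := by
  simp [usedAt, List.getD, List.getElem?_set_ne (Ne.symm h)]

lemma usedAt_set_self (l : List Bool) (j : Nat) (h : j < l.length) :
    usedAt (l.set j true) j = true := by
  simp [usedAt, List.getD, h]

lemma findMatch_eq_head (used : List Bool) (op : List (String × String)) :
    ∀ (l : List (List (String × String))) (i : Nat),
      findMatch used op i l = (remI used (tkey op) i l).head? := by
  intro l
  induction l with
  | nil => intro i; simp [findMatch, remI]
  | cons t rest ih =>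
    intro i
    by_cases hu : usedAt used i
    · simp [findMatch, remI, hu, ih]
    · by_cases hk : tkey t = tkey op
      · have hk' : dget t "token" = dget op "token" ∧ dget t "tier" = dget op "tier" := by
          have := hk; simp [tkey, Prod.ext_iff] at this; exact this
        simp [findMatch, remI, hu, hk, hk']
      · have hk' : ¬ (dget t "token" = dget op "token" ∧ dget t "tier" = dget op "tier") := by
          intro hc; exact hk (by simp [tkey, Prod.ext_iff]; exact hc)
        simp [findMatch, remI, hu, hk, hk', ih]

lemma remI_idx_ge (used : List Bool) (k : Option String × Option String) :
    ∀ (l : List (List (String × String))) (i : Nat) (p : Nat × List (String × String)),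
      p ∈ remI used k i l → i ≤ p.1 := by
  intro l
  induction l with
  | nil => intro i p hp; simp [remI] at hp
  | cons t rest ih =>
    intro i p hp
    by_cases hc : usedAt used i = false ∧ tkey t = k
    · simp [remI, hc] at hp
      rcases hp with h | h
      · simp [h]
      · have := ih (i + 1) p h; omega
    · simp [remI, hc] at hp
      have := ih (i + 1) p hp; omega

lemma remI_idx_lt (used : List Bool) (k : Option String × Option String) :
    ∀ (l : List (List (String × String))) (i : Nat) (p : Nat × List (String × String)),
      p ∈ remI used k i l → p.1 < i + l.length := by
  intro l
  induction l with
  | nil => intro i p hp; simp [remI] at hp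
  | cons t rest ih =>
    intro i p hp
    by_cases hc : usedAt used i = false ∧ tkey t = k
    · simp [remI, hc] at hp
      rcases hp with h | h
      · simp [h]
      · have := ih (i + 1) p h; simp; omega
    · simp [remI, hc] at hp
      have := ih (i + 1) p hp; simp; omega

-- setting an index strictly below the range leaves remI unchanged
lemma remI_set_lt (used : List Bool) (k : Option String × Option String) (j : Nat) :
    ∀ (l : List (List (String × String))) (i : Nat), j < i →
      remI (used.set j true) k i l = remI used k i l := by
  intro l
  induction l with
  | nil => intro i _; simp [remI]
  | cons t rest ih =>
    intro i hji
    have hne : i ≠ j := by omega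
    rw [remI, remI, usedAt_set_ne used j i hne, ih (i + 1) (by omega)]

lemma remI_set_head (used : List Bool) (k : Option String × Option String)
    (j : Nat) (t : List (String × String)) (hj : j < used.length) :
    ∀ (l : List (List (String × String))) (i : Nat),
      (remI used k i l).head? = some (j, t) →
      remI (used.set j true) k i l = (remI used k i l).tail := by
  intro l
  induction l with
  | nil => intro i h; simp [remI] at h
  | cons t' rest ih =>
    intro i hhead
    by_cases hc : usedAt used i = false ∧ tkey t' = k
    · rw [remI, if_pos hc] at hhead
      simp at hhead
      obtain ⟨hij, -⟩ := hhead
      subst hij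
      rw [remI, remI, if_pos hc]
      rw [if_neg (by rw [usedAt_set_self used i hj]; simp)]
      rw [remI_set_lt used k i rest (i + 1) (by omega)]
      simp
    · rw [remI, if_neg hc] at hhead
      have hge : i + 1 ≤ j := by
        have hmem : (j, t) ∈ remI used k (i + 1) rest := List.mem_of_mem_head? hhead
        exact remI_idx_ge used k rest (i + 1) (j, t) hmem
      rw [remI, remI, if_neg hc]
      rw [if_neg (by rw [usedAt_set_ne used j i (by omega)]; exact hc)]
      exact ih (i + 1) hhead

lemma remI_set_ne (used : List Bool) (k k' : Option String × Option String)
    (j : Nat) (t : List (String × String)) (hj : j < used.length) (hkk : k' ≠ k) :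
    ∀ (l : List (List (String × String))) (i : Nat),
      (remI used k i l).head? = some (j, t) →
      remI (used.set j true) k' i l = remI used k' i l := by
  intro l
  induction l with
  | nil => intro i h; simp [remI] at h
  | cons t' rest ih =>
    intro i hhead
    by_cases hij : i = j
    · subst hij
      by_cases hc : usedAt used i = false ∧ tkey t' = k
      · have hkt : tkey t' ≠ k' := by rw [hc.2]; exact fun h => hkk h.symm
        rw [remI, remI]
        rw [if_neg (by intro h; exact hkt h.2), if_neg (by intro h; exact hkt h.2)]
        exact remI_set_lt used k' i rest (i + 1) (by omega)
      · rw [remI, if_neg hc] at hhead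
        have hmem := List.mem_of_mem_head? hhead
        have := remI_idx_ge used k rest (i + 1) _ hmem
        simp at this
    · have hgd : usedAt (used.set j true) i = usedAt used i :=
        usedAt_set_ne used j i hij
      by_cases hck : usedAt used i = false ∧ tkey t' = k
      · rw [remI, if_pos hck] at hhead
        simp at hhead
        omega
      · rw [remI, if_neg hck] at hhead
        by_cases hc' : usedAt used i = false ∧ tkey t' = k'
        · rw [remI, if_pos (by rw [hgd]; exact hc'), remI, if_pos hc']
          rw [ih (i + 1) hhead]
        · rw [remI, if_neg (by rw [hgd]; exact hc'), remI, if_neg hc']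
          exact ih (i + 1) hhead

lemma aLoop_eq_ref (trades : List (List (String × String))) :
    ∀ (ops : List (List (String × String))) (used : List Bool)
      (pairs : List ((List (String × String)) × (List (String × String))))
      (F : (Option String × Option String) → List (List (String × String))),
      (∀ k, F k = (remI used k 0 trades).map (·.2)) →
      used.length = trades.length →
      aLoop trades ops used pairs = refLoop ops F pairs := by
  intro ops
  induction ops with
  | nil => intro used pairs F _ _; simp [aLoop, refLoop]
  | cons op rest ih =>
    intro used pairs F hF hlen
    rw [aLoop, refLoop, hF (tkey op), findMatch_eq_head]
    cases hhead : (remI used (tkey op) 0 trades).head? with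
    | none =>
      have : remI used (tkey op) 0 trades = [] := by
        cases h : remI used (tkey op) 0 trades with
        | nil => rfl
        | cons a as => rw [h] at hhead; simp at hhead
      rw [this]
      simp only [List.map_nil]
      exact ih used pairs F hF hlen
    | some p =>
      obtain ⟨j, t⟩ := p
      have hmem : (j, t) ∈ remI used (tkey op) 0 trades := List.mem_of_mem_head? hhead
      have hjlt : j < trades.length := by
        have := remI_idx_lt used (tkey op) trades 0 (j, t) hmem; simpa using this
      have hju : j < used.length := by omega
      cases hrem : remI used (tkey op) 0 trades with
      | nil => rw [hrem] at hhead; simp at hhead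
      | cons a as =>
        rw [hrem] at hhead; simp at hhead; subst hhead
        simp only [List.map_cons]
        apply ih (used.set j true) (pairs ++ [(op, t)])
        · intro k'
          by_cases hk : k' = tkey op
          · subst hk
            rw [if_pos rfl]
            rw [remI_set_head used (tkey op) j t hju trades 0 (by rw [hrem]; rfl), hrem]
            simp
          · rw [if_neg hk]
            rw [remI_set_ne used (tkey op) k' j t hju hk trades 0 (by rw [hrem]; rfl)]
            exact hF k'
        · simp [hlen]

lemma usedAt_replicate_false (n i : Nat) : usedAt (List.replicate n false) i = false := by
  simp [usedAt, List.getD]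

lemma remI_replicate (n : Nat) (k : Option String × Option String) :
    ∀ (l : List (List (String × String))) (i : Nat),
      (remI (List.replicate n false) k i l).map (·.2)
        = l.filter (fun t => decide (tkey t = k)) := by
  intro l
  induction l with
  | nil => intro i; simp [remI]
  | cons t rest ih =>
    intro i
    rw [remI]
    by_cases hk : tkey t = k
    · rw [if_pos ⟨usedAt_replicate_false n i, hk⟩]
      simp [hk, ih (i + 1)]
    · rw [if_neg (fun h => hk h.2)]
      simp [hk, ih (i + 1)]

-- B-side: the building fold indexes trades by (key, ordinal)
lemma build_inv :
    ∀ (l : List (List (String × String)))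
      (slot : PySem.Dict ((Option String × Option String) × Nat) (List (String × String)))
      (cnt : PySem.Dict (Option String × Option String) Nat)
      (G : (Option String × Option String) → List (List (String × String))),
      (∀ k, cnt.getD k 0 = (G k).length) →
      (∀ k j, slot.get? (k, j) = (G k)[j]?) →
      (∀ k j,
        (l.foldl (fun p t => ((p.1.insert (tkey t, p.2.getD (tkey t) 0) t),
                              (p.2.insert (tkey t) (p.2.getD (tkey t) 0 + 1)))) (slot, cnt)).1.get? (k, j)
          = (G k ++ l.filter (fun t => decide (tkey t = k)))[j]?) := by
  intro l
  induction l with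
  | nil => intro slot cnt G hc hs k j; simpa using hs k j
  | cons t rest ih =>
    intro slot cnt G hc hs k j
    simp only [List.foldl_cons]
    have hGt : (fun k => if k = tkey t then G k ++ [t] else G k) (tkey t) = G (tkey t) ++ [t] := by
      simp
    have hGne : ∀ k', k' ≠ tkey t →
        (fun k => if k = tkey t then G k ++ [t] else G k) k' = G k' := by
      intro k' h; simp [h]
    have step := ih (slot.insert (tkey t, cnt.getD (tkey t) 0) t)
        (cnt.insert (tkey t) (cnt.getD (tkey t) 0 + 1))
        (fun k => if k = tkey t then G k ++ [t] else G k)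
        (by
          intro k'
          by_cases hk : k' = tkey t
          · subst hk
            rw [PySem.Dict.getD_insert_self, hGt, hc]
            simp
          · rw [PySem.Dict.getD_insert_of_ne cnt _ 0 hk, hGne k' hk]
            exact hc k')
        (by
          intro k' j'
          by_cases hkj : (k', j') = (tkey t, cnt.getD (tkey t) 0)
          · have hk1 : k' = tkey t := (Prod.ext_iff.mp hkj).1
            have hj1 : j' = cnt.getD (tkey t) 0 := (Prod.ext_iff.mp hkj).2
            subst hk1; subst hj1
            rw [PySem.Dict.get?_insert_self, hGt, hc]
            simp
          · rw [PySem.Dict.get?_insert_of_ne slot t hkj, hs k' j']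
            by_cases hk : k' = tkey t
            · subst hk
              rw [hGt]
              have hj : j' ≠ (G (tkey t)).length := by
                intro h
                exact hkj (by rw [h, ← hc (tkey t)])
              rcases Nat.lt_or_ge j' (G (tkey t)).length with hlt | hge
              · rw [List.getElem?_append_left hlt]
              · have h1 : (G (tkey t))[j']? = none := List.getElem?_eq_none hge
                have h2 : (G (tkey t) ++ [t])[j']? = none := by
                  apply List.getElem?_eq_none
                  simp; omega
                rw [h1, h2]
            · rw [hGne k' hk])
    rw [step]
    by_cases hk : k = tkey t
    · subst hk
      rw [hGt]
      simp [List.append_assoc]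
    · rw [hGne k hk]
      have hne : ¬ (tkey t = k) := fun h => hk h.symm
      simp [hne]

-- B's loop equals the reference loop: seen's per-key count is how far the queue has advanced
lemma bLoop_eq_ref
    (slot : PySem.Dict ((Option String × Option String) × Nat) (List (String × String)))
    (H : (Option String × Option String) → List (List (String × String)))
    (hslot : ∀ k j, slot.get? (k, j) = (H k)[j]?) :
    ∀ (ops : List (List (String × String)))
      (seen : PySem.Dict (Option String × Option String) Nat)
      (pairs : List ((List (String × String)) × (List (String × String))))
      (F : (Option String × Option String) → List (List (String × String))),
      (∀ k, F k = (H k).drop (seen.getD k 0)) →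
      bLoop slot ops seen pairs = refLoop ops F pairs := by
  intro ops
  induction ops with
  | nil => intro seen pairs F _; simp [bLoop, refLoop]
  | cons op rest ih =>
    intro seen pairs F hF
    rw [bLoop, refLoop]
    have hhead : slot.get? (tkey op, seen.getD (tkey op) 0) = (F (tkey op)).head? := by
      rw [hslot, hF (tkey op), List.head?_drop]
    cases hq : slot.get? (tkey op, seen.getD (tkey op) 0) with
    | none =>
      have hFnil : F (tkey op) = [] := by
        rw [hq] at hhead
        exact List.head?_eq_none_iff.mp hhead.symm
      rw [hFnil]
      apply ih
      intro k
      by_cases hk : k = tkey op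
      · subst hk
        rw [PySem.Dict.getD_insert_self]
        have h1 : (H (tkey op)).drop (seen.getD (tkey op) 0) = [] := by
          rw [← hF (tkey op)]; exact hFnil
        have h2 : (H (tkey op)).drop (seen.getD (tkey op) 0 + 1) = [] := by
          rw [← List.tail_drop, h1]
          rfl
        rw [h2, ← h1, ← hF (tkey op), hFnil]
      · rw [PySem.Dict.getD_insert_of_ne seen _ 0 hk]
        exact hF k
    | some t =>
      rw [hq] at hhead
      cases hFc : F (tkey op) with
      | nil => rw [hFc] at hhead; simp at hhead
      | cons a as =>
        rw [hFc] at hhead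
        simp at hhead
        subst hhead
        apply ih
        intro k
        by_cases hk : k = tkey op
        · subst hk
          rw [if_pos rfl, List.tail_cons]
          have : as = ((H (tkey op)).drop (seen.getD (tkey op) 0)).tail := by
            rw [← hF (tkey op), hFc, List.tail_cons]
          rw [PySem.Dict.getD_insert_self, this, List.tail_drop]
        · rw [if_neg hk, PySem.Dict.getD_insert_of_ne seen _ 0 hk]
          exact hF k

-- ===== VERDICT (by name: the statement is the Claim_ definition above) =====
theorem pair_trades_spec : Claim_equal_pair_trades := by
  intro opens trades _
  unfold Spec_pair_trades pair_trades pair_trades_alt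
  set F0 : (Option String × Option String) → List (List (String × String)) :=
    fun k => trades.filter (fun t => decide (tkey t = k)) with hF0
  rw [aLoop_eq_ref trades opens (List.replicate trades.length false) [] F0
      (fun k => by rw [hF0]; exact (remI_replicate trades.length k trades 0).symm)
      (by simp)]
  have hslot : ∀ k j, (buildSlots trades).1.get? (k, j) = (F0 k)[j]? := by
    intro k j
    unfold buildSlots
    have := build_inv trades PySem.Dict.empty PySem.Dict.empty (fun _ => [])
      (by intro k; simp) (by intro k j; simp) k j
    simpa [hF0] using this
  rw [bLoop_eq_ref (buildSlots trades).1 F0 hslot opens PySem.Dict.empty [] F0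
      (by intro k; simp)]
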